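-- pv_equiv track=rewrite | github.com/irfanbadur/elektrikDagitimSistem | server/scripts/sync-trafolu-yb.py | boumler_bul
-- ===== SOURCE A (Python) =====
-- def boumler_bul(rows):
--     """[(start_row, end_row, tip), ...]"""
--     bolumler = []
--     cur, cur_start = None, None
--     for r in range(3, len(rows)):
--         if not rows[r]: continue
--         f0 = str(rows[r][0]).strip().upper() if rows[r][0] else ''
--         if f0 == 'MALZEME - MONTAJ': new_t = 'mlz_mt'
--         elif f0 == 'DEMONTAJ': new_t = 'dm'
--         elif f0 in ('DM+M', 'DMM', 'DEMONTAJDAN MONTAJ'): new_t = 'dmm'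
--         elif f0 == 'TOPLAM':
--             if cur: bolumler.append((cur_start, r, cur))
--             return bolumler
--         else: continue
--         if new_t != cur:
--             if cur: bolumler.append((cur_start, r, cur))
--             cur, cur_start = new_t, r
--     if cur: bolumler.append((cur_start, len(rows), cur))
--     return bolumler
-- ===== SOURCE B (Python) =====
-- def boumler_bul(rows):
--     """[(start_row, end_row, tip), ...] — two-pass: collect marker boundaries, then coalesce runs."""
--     def tip(row):
--         if not row:
--             return None
--         f0 = str(row[0]).strip().upper() if row[0] else ''
--         if f0 == 'MALZEME - MONTAJ': return 'mlz_mt'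
--         if f0 == 'DEMONTAJ': return 'dm'
--         if f0 in ('DM+M', 'DMM', 'DEMONTAJDAN MONTAJ'): return 'dmm'
--         if f0 == 'TOPLAM': return 'TOPLAM'
--         return None
--
--     boundaries = []
--     for r in range(3, len(rows)):
--         t = tip(rows[r])
--         if t is None:
--             continue
--         boundaries.append((r, t))
--         if t == 'TOPLAM':
--             break
--
--     out = []
--     i, n = 0, len(boundaries)
--     while i < n:
--         r, t = boundaries[i]
--         if t == 'TOPLAM':
--             break
--         j = i + 1
--         while j < n and boundaries[j][1] == t:
--             j += 1
--         end = boundaries[j][0] if j < n else len(rows)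
--         out.append((r, end, t))
--         i = j
--     return out
-- ===== Notes on version B (the rewrite author's own statement) =====
-- stated objective: alternative
-- what changed: Replaces A's single stateful pass (current-type/start accumulator with early return) by a two-phase pipeline: collect the list of (row, type) marker boundaries (stopping at TOPLAM), then coalesce maximal runs of equal consecutive types into sections.
import Mathlib
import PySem

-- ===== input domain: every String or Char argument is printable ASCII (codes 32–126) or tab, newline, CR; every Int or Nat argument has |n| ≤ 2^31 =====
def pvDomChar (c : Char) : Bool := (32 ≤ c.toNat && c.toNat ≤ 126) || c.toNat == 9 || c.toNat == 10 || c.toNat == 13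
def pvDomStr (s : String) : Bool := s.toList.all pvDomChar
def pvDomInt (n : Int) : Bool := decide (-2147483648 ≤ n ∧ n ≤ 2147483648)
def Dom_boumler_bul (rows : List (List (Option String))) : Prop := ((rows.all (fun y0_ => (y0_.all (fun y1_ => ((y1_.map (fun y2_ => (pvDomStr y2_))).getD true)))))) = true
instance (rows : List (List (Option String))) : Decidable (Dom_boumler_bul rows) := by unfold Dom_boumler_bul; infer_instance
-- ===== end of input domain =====

-- B replaces A's single stateful scan by a boundary-collection pass plus a run-coalescing pass (alternative decomposition, same cost).

-- f0 = str(row[0]).strip().upper() if row[0] else ''  (shared expression of both Pythons)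
def pyF0 (o : Option String) : String :=
  match o with
  | none => ""
  | some s => if s = "" then "" else PySem.Str.upper (PySem.Str.strip s)

-- ===== PORT A =====
-- 'if cur: bolumler.append((cur_start, r, cur))'
def closeAt (s r : Int) : Option String → List (Int × Int × String)
  | some c => [(s, r, c)]
  | none => []

-- A's for-loop over r in range(3, len(rows)), with state (cur, cur_start, bolumler); early return at TOPLAM.
-- rows[r] is always in range for the indices supplied, so the .getD [] default is never used.
def boumlerLoop (rows : List (List (Option String))) :
    List Int → Option String → Int → List (Int × Int × String) → List (Int × Int × String)
  | [], cur, curStart, acc =>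
      acc ++ closeAt curStart (rows.length : Int) cur
  | r :: rest, cur, curStart, acc =>
      let row := PySem.List.pyGetD rows r []
      if row.isEmpty then boumlerLoop rows rest cur curStart acc
      else
        let f0 := pyF0 (PySem.List.pyGetD row 0 none)
        if f0 = "MALZEME - MONTAJ" then
          (if some "mlz_mt" = cur then boumlerLoop rows rest cur curStart acc
           else boumlerLoop rows rest (some "mlz_mt") r (acc ++ closeAt curStart r cur))
        else if f0 = "DEMONTAJ" then
          (if some "dm" = cur then boumlerLoop rows rest cur curStart acc
           else boumlerLoop rows rest (some "dm") r (acc ++ closeAt curStart r cur))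
        else if (f0 = "DM+M" ∨ f0 = "DMM" ∨ f0 = "DEMONTAJDAN MONTAJ") then
          (if some "dmm" = cur then boumlerLoop rows rest cur curStart acc
           else boumlerLoop rows rest (some "dmm") r (acc ++ closeAt curStart r cur))
        else if f0 = "TOPLAM" then
          acc ++ closeAt curStart r cur
        else boumlerLoop rows rest cur curStart acc

def boumler_bul (rows : List (List (Option String))) : List (Int × Int × String) :=
  boumlerLoop rows (PySem.List.pyRange 3 rows.length 1) none 0 []

-- ===== PORT B =====
-- B's tip(row): classify a row's first cell.
def tipOf (row : List (Option String)) : Option String :=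
  if row.isEmpty then none
  else
    let f0 := pyF0 (PySem.List.pyGetD row 0 none)
    if f0 = "MALZEME - MONTAJ" then some "mlz_mt"
    else if f0 = "DEMONTAJ" then some "dm"
    else if (f0 = "DM+M" ∨ f0 = "DMM" ∨ f0 = "DEMONTAJDAN MONTAJ") then some "dmm"
    else if f0 = "TOPLAM" then some "TOPLAM"
    else none

-- phase 1: boundaries = [(r, t)] for marker rows, stopping after TOPLAM.
def collectB (rows : List (List (Option String))) : List Int → List (Int × String)
  | [] => []
  | r :: rest =>
      match tipOf (PySem.List.pyGetD rows r []) with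
      | none => collectB rows rest
      | some t => (r, t) :: (if t = "TOPLAM" then [] else collectB rows rest)

-- phase 2: coalesce maximal runs of equal types; the inner while-scan is the dropWhile.
def emitB (L : Int) : List (Int × String) → List (Int × Int × String)
  | [] => []
  | (r, t) :: rest =>
      if t = "TOPLAM" then []
      else
        match h : rest.dropWhile (fun p => p.2 = t) with
        | [] => [(r, L, t)]
        | (r2, t2) :: rest2 => (r, r2, t) :: emitB L ((r2, t2) :: rest2)
  termination_by bs => bs.length
  decreasing_by
    have := List.length_dropWhile_le (fun p => p.2 = t) rest
    rw [h] at this; simp at this ⊢; omega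

def boumler_bul_alt (rows : List (List (Option String))) : List (Int × Int × String) :=
  emitB (rows.length : Int) (collectB rows (PySem.List.pyRange 3 rows.length 1))

-- ===== PRECONDITION & SPEC =====
def Spec_boumler_bul (rows : List (List (Option String))) (out : List (Int × Int × String)) : Prop := out = boumler_bul_alt rows
instance (rows : List (List (Option String))) (out : List (Int × Int × String)) : Decidable (Spec_boumler_bul rows out) := by unfold Spec_boumler_bul; infer_instance

-- ===== CLAIM (what is proved, stated in full; the proofs are below) =====
def Claim_equal_boumler_bul : Prop := ∀ (rows : List (List (Option String))), Dom_boumler_bul rows → Spec_boumler_bul rows (boumler_bul rows)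

-- ===== LEMMAS AND PROOFS =====

-- proof-side: emitB's behaviour on a cons, phrased as an open-section continuation
def emitFrom (L s : Int) (c : String) : List (Int × String) → List (Int × Int × String)
  | [] => [(s, L, c)]
  | (r, t) :: rest => if t = c then emitFrom L s c rest else (s, r, c) :: emitB L ((r, t) :: rest)

lemma emitB_cons_unfold (L r : Int) (t : String) (rest : List (Int × String)) (h : t ≠ "TOPLAM") :
    emitB L ((r, t) :: rest) =
      (match rest.dropWhile (fun p => decide (p.2 = t)) with
       | [] => [(r, L, t)]
       | p :: rest2 => (r, p.1, t) :: emitB L (p :: rest2)) := by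
  rw [emitB.eq_def]
  simp only [h, if_false]
  split <;> rename_i heq <;> rw [heq]

lemma emitB_cons (L r : Int) (t : String) (rest : List (Int × String)) (h : t ≠ "TOPLAM") :
    emitB L ((r, t) :: rest) = emitFrom L r t rest := by
  induction rest with
  | nil => simp [emitB, emitFrom, h]
  | cons p rest2 ih =>
      obtain ⟨r2, t2⟩ := p
      by_cases ht : t2 = t
      · subst ht
        rw [emitB_cons_unfold _ _ _ _ h]
        rw [show List.dropWhile (fun p => decide (p.2 = t2)) ((r2, t2) :: rest2)
              = List.dropWhile (fun p => decide (p.2 = t2)) rest2 by simp [List.dropWhile]]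
        rw [← emitB_cons_unfold _ _ _ _ h, ih]
        simp [emitFrom]
      · rw [emitB_cons_unfold _ _ _ _ h]
        simp [emitFrom, ht, List.dropWhile]

-- the value of the whole remaining computation, as a function of the open section
def emitK (rows : List (List (Option String))) (cur : Option String) (s : Int)
    (bs : List (Int × String)) : List (Int × Int × String) :=
  match cur with
  | none => emitB (rows.length : Int) bs
  | some c => emitFrom (rows.length : Int) s c bs

lemma step_eq (rows : List (List (Option String))) (rest : List Int)
    (ih : ∀ (cur : Option String) (s : Int) (acc : List (Int × Int × String)),
      cur ≠ some "TOPLAM" →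
      boumlerLoop rows rest cur s acc = acc ++ emitK rows cur s (collectB rows rest))
    (r : Int) (nt : String) (hnt : nt ≠ "TOPLAM")
    (cur : Option String) (s : Int) (acc : List (Int × Int × String))
    (hcur : cur ≠ some "TOPLAM") :
    (if some nt = cur then boumlerLoop rows rest cur s acc
     else boumlerLoop rows rest (some nt) r (acc ++ closeAt s r cur)) =
    acc ++ emitK rows cur s ((r, nt) :: collectB rows rest) := by
  cases cur with
  | none =>
      simp only [reduceCtorEq, if_false, closeAt, List.append_nil]
      rw [ih (some nt) r acc (by simp [hnt])]
      simp [emitK, emitB_cons _ _ _ _ hnt]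
  | some c =>
      by_cases hc : nt = c
      · subst hc
        rw [if_pos rfl, ih (some nt) s acc hcur]
        simp [emitK, emitFrom]
      · rw [if_neg (by simp [hc]), ih (some nt) r _ (by simp [hnt])]
        simp [emitK, closeAt, emitFrom, hc, emitB_cons _ _ _ _ hnt]

lemma loop_eq (rows : List (List (Option String))) (idxs : List Int) :
    ∀ (cur : Option String) (s : Int) (acc : List (Int × Int × String)),
      cur ≠ some "TOPLAM" →
      boumlerLoop rows idxs cur s acc = acc ++ emitK rows cur s (collectB rows idxs) := by
  induction idxs with
  | nil =>
      intro cur s acc hcur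
      cases cur <;> simp [boumlerLoop, collectB, emitK, emitB, emitFrom, closeAt]
  | cons r rest ih =>
      intro cur s acc hcur
      rw [boumlerLoop, collectB]
      by_cases he : (PySem.List.pyGetD rows r []).isEmpty
      · simp only [he, if_pos, tipOf]
        exact ih cur s acc hcur
      · simp only [he, tipOf]
        by_cases h1 : pyF0 (PySem.List.pyGetD (PySem.List.pyGetD rows r []) 0 none) = "MALZEME - MONTAJ"
        · simpa [h1] using step_eq rows rest ih r "mlz_mt" (by decide) cur s acc hcur
        · by_cases h2 : pyF0 (PySem.List.pyGetD (PySem.List.pyGetD rows r []) 0 none) = "DEMONTAJ"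
          · simpa [h1, h2] using step_eq rows rest ih r "dm" (by decide) cur s acc hcur
          · by_cases h3 : (pyF0 (PySem.List.pyGetD (PySem.List.pyGetD rows r []) 0 none) = "DM+M" ∨
                pyF0 (PySem.List.pyGetD (PySem.List.pyGetD rows r []) 0 none) = "DMM" ∨
                pyF0 (PySem.List.pyGetD (PySem.List.pyGetD rows r []) 0 none) = "DEMONTAJDAN MONTAJ")
            · simpa [h1, h2, h3] using step_eq rows rest ih r "dmm" (by decide) cur s acc hcur
            · by_cases h4 : pyF0 (PySem.List.pyGetD (PySem.List.pyGetD rows r []) 0 none) = "TOPLAM"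
              · cases cur with
                | none => simp [h4, emitK, emitB, closeAt]
                | some c =>
                    have hc : c ≠ "TOPLAM" := fun h => hcur (by rw [h])
                    simp [h4, emitK, emitB, emitFrom, closeAt, Ne.symm hc]
              · simp only [h1, h2, h3, h4, if_false]
                exact ih cur s acc hcur

-- ===== VERDICT (by name: the statement is the Claim_ definition above) =====
theorem boumler_bul_spec : Claim_equal_boumler_bul := by
  intro rows _
  show boumler_bul rows = boumler_bul_alt rows
  rw [boumler_bul, boumler_bul_alt,
    loop_eq rows (PySem.List.pyRange 3 rows.length 1) none 0 [] (by simp)]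
  rfl
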